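-- pv_equiv track=rewrite | github.com/baleato/paper-bullets | eval.py | _convert_to_start_end
-- ===== SOURCE A (Python) =====
-- def _convert_to_start_end(binary_tensor):
--     """Auxiliary function to convert a binary list in positive spans.
--     Example: f([0,0,1,1,1,0,0,1,0]) = [(2,5), (7,8)]
--     """
--     acc = []
--     prev_val = 0
--     track_index = -1
--     for index, value in enumerate(binary_tensor):
--         if value:
--             if not prev_val:
--                 track_index = index
--         else:
--             if prev_val:
--                 acc.append((track_index, index))
--         prev_val = value
--     if prev_val:
--         acc.append((track_index, len(binary_tensor)))
--     return acc
-- ===== SOURCE B (Python) =====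
-- def _convert_to_start_end(binary_tensor):
--     """Edge-detection formulation: rising edges are the starts, falling edges
--     (with a virtual trailing 0) are the ends; zip them into spans."""
--     prev_pad = [0] + list(binary_tensor)
--     next_pad = list(binary_tensor) + [0]
--     starts = [i for i, (p, v) in enumerate(zip(prev_pad, binary_tensor)) if v and not p]
--     ends = [i for i, (p, v) in enumerate(zip(prev_pad, next_pad)) if p and not v]
--     return list(zip(starts, ends))
-- ===== Notes on version B (the rewrite author's own statement) =====
-- stated objective: alternative
-- what changed: Replaces A's one-pass state machine (prev_val/track_index with appends) by an edge-detection decomposition: rising edges collected as starts, falling edges against a virtual trailing 0 as ends, then zipped into spans.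
import Mathlib
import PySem

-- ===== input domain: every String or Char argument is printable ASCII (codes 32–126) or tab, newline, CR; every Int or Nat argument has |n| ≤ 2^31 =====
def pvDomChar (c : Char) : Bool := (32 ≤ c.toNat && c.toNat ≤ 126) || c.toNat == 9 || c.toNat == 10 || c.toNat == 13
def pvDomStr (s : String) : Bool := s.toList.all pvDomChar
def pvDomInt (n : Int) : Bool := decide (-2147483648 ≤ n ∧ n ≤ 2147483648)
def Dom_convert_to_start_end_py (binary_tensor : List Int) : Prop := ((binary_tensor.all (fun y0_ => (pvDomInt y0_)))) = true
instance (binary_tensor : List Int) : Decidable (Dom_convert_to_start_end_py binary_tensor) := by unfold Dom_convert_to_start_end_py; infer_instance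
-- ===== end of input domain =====

-- B replaces A's one-pass state machine by an edge-detection decomposition (rising edges = starts,
-- falling edges with a virtual trailing 0 = ends, zipped); objective: alternative, same O(n) cost.

-- ===== PORT A =====
-- loop body of A's for-loop: state = (acc, prev_val, track_index)
def pvStepA (s : List (Int × Int) × Int × Int) (iv : Int × Int) : List (Int × Int) × Int × Int :=
  let (acc, prev_val, track_index) := s
  let (index, value) := iv
  if value ≠ 0 then
    if prev_val = 0 then (acc, value, index) else (acc, value, track_index)
  else
    if prev_val ≠ 0 then (acc ++ [(track_index, index)], value, track_index)
    else (acc, value, track_index)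

def convert_to_start_end_py (binary_tensor : List Int) : List (Int × Int) :=
  let st := (PySem.List.enumerate binary_tensor).foldl pvStepA ([], 0, -1)
  if st.2.1 ≠ 0 then st.1 ++ [(st.2.2, (binary_tensor.length : Int))] else st.1

-- ===== PORT B =====
def convert_to_start_end_py_alt (binary_tensor : List Int) : List (Int × Int) :=
  let prev_pad := 0 :: binary_tensor
  let next_pad := binary_tensor ++ [0]
  let starts := ((PySem.List.enumerate (prev_pad.zip binary_tensor)).filter
      (fun x => decide (x.2.2 ≠ 0) && decide (x.2.1 = 0))).map (·.1)
  let ends := ((PySem.List.enumerate (prev_pad.zip next_pad)).filter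
      (fun x => decide (x.2.1 ≠ 0) && decide (x.2.2 = 0))).map (·.1)
  starts.zip ends

-- ===== PRECONDITION & SPEC =====
def Spec_convert_to_start_end_py (binary_tensor : List Int) (out : List (Int × Int)) : Prop := out = convert_to_start_end_py_alt binary_tensor
instance (binary_tensor : List Int) (out : List (Int × Int)) : Decidable (Spec_convert_to_start_end_py binary_tensor out) := by unfold Spec_convert_to_start_end_py; infer_instance

-- ===== CLAIM (what is proved, stated in full; the proofs are below) =====
def Claim_equal_convert_to_start_end_py : Prop := ∀ (binary_tensor : List Int), Dom_convert_to_start_end_py binary_tensor → Spec_convert_to_start_end_py binary_tensor (convert_to_start_end_py binary_tensor)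

-- ===== LEMMAS AND PROOFS =====

-- list of rising-edge indices of l, given the previous value p and the index i of the head
def risingAux : Int → Int → List Int → List Int
  | _, _, [] => []
  | p, i, v :: r => (if v ≠ 0 ∧ p = 0 then [i] else []) ++ risingAux v (i+1) r

-- list of falling-edge indices of l (closing a trailing run at the end index)
def fallingAux : Int → Int → List Int → List Int
  | p, i, [] => if p ≠ 0 then [i] else []
  | p, i, v :: r => (if p ≠ 0 ∧ v = 0 then [i] else []) ++ fallingAux v (i+1) r

theorem starts_eq (l : List Int) (p i : Int) :
    (((PySem.List.enumerate ((p :: l).zip l) i).filter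
      (fun x => decide (x.2.2 ≠ 0) && decide (x.2.1 = 0))).map (·.1)) = risingAux p i l := by
  induction l generalizing p i with
  | nil => simp [risingAux, PySem.List.enumerate_nil]
  | cons v r ih =>
    by_cases hv : v = 0 <;> by_cases hp : p = 0 <;>
      simpa [risingAux, hv, hp, List.zip_cons_cons, PySem.List.enumerate_cons,
        List.filter_cons] using ih v (i+1)

theorem ends_eq (l : List Int) (p i : Int) :
    (((PySem.List.enumerate ((p :: l).zip (l ++ [0])) i).filter
      (fun x => decide (x.2.1 ≠ 0) && decide (x.2.2 = 0))).map (·.1)) = fallingAux p i l := by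
  induction l generalizing p i with
  | nil =>
    by_cases hp : p = 0 <;>
      simp [fallingAux, hp, PySem.List.enumerate_cons, PySem.List.enumerate_nil]
  | cons v r ih =>
    by_cases hv : v = 0 <;> by_cases hp : p = 0 <;>
      simpa [fallingAux, hv, hp, List.zip_cons_cons, PySem.List.enumerate_cons,
        List.filter_cons] using ih v (i+1)

theorem foldA_eq (l : List Int) (i prev track n : Int) (acc : List (Int × Int))
    (hn : n = i + (l.length : Int)) :
    (let st := (PySem.List.enumerate l i).foldl pvStepA (acc, prev, track)
     if st.2.1 ≠ 0 then st.1 ++ [(st.2.2, n)] else st.1)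
    = acc ++ ((if prev ≠ 0 then [track] else []) ++ risingAux prev i l).zip (fallingAux prev i l) := by
  induction l generalizing i prev track n acc with
  | nil =>
    subst hn
    by_cases hp : prev = 0 <;>
      simp [risingAux, fallingAux, hp, PySem.List.enumerate_nil]
  | cons v r ih =>
    have hn' : n = (i + 1) + (r.length : Int) := by rw [hn, List.length_cons]; push_cast; ring
    by_cases hv : v = 0 <;> by_cases hp : prev = 0
    · -- v = 0, prev = 0
      simpa [pvStepA, risingAux, fallingAux, hv, hp, PySem.List.enumerate_cons]
        using ih (i+1) v track n acc hn'
    · -- v = 0, prev ≠ 0 : close the run at i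
      simpa [pvStepA, risingAux, fallingAux, hv, hp, PySem.List.enumerate_cons]
        using ih (i+1) v track n (acc ++ [(track, i)]) hn'
    · -- v ≠ 0, prev = 0 : open a run at i
      simpa [pvStepA, risingAux, fallingAux, hv, hp, PySem.List.enumerate_cons]
        using ih (i+1) v i n acc hn'
    · -- v ≠ 0, prev ≠ 0 : run continues
      simpa [pvStepA, risingAux, fallingAux, hv, hp, PySem.List.enumerate_cons]
        using ih (i+1) v track n acc hn'

-- ===== VERDICT (by name: the statement is the Claim_ definition above) =====
theorem convert_to_start_end_py_spec : Claim_equal_convert_to_start_end_py := by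
  intro l _
  unfold Spec_convert_to_start_end_py
  have hb : convert_to_start_end_py_alt l = (risingAux 0 0 l).zip (fallingAux 0 0 l) := by
    simp only [convert_to_start_end_py_alt]
    rw [starts_eq l 0 0, ends_eq l 0 0]
  have ha : convert_to_start_end_py l = (risingAux 0 0 l).zip (fallingAux 0 0 l) := by
    have h := foldA_eq l 0 0 (-1) (l.length : Int) [] (by simp)
    simpa [convert_to_start_end_py] using h
  rw [ha, hb]
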